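-- pv_equiv track=rewrite | github.com/PrathamLearnsToCode/DNA_sequencing | File Handling/Python_genomic.py | has_stop_codon
-- ===== SOURCE A (Python) =====
-- def has_stop_codon(dna):
--     stop_codon_found = False
--     stop_codons = ["tga", "tag", "taa"]
--     for i in range(0, len(dna), 3):
--         codon = dna[i:i+3].lower()
--         if codon in stop_codons:
--             stop_codon_found = True
--             break
--     return stop_codon_found
-- ===== SOURCE B (Python) =====
-- def has_stop_codon(dna):
--     stops = {"tga", "tag", "taa"}
--     it = iter(dna.lower())
--     for codon in map(''.join, zip(it, it, it)):
--         if codon in stops: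
--             return True
--     return False
-- ===== Notes on version B (the rewrite author's own statement) =====
-- stated objective: faster
-- what changed: Replaces the index-stepping loop with break flag and per-codon slice-and-lower by one upfront lowercasing and an iterator zipped into whole codon triples checked against a set; partial trailing codons are skipped since they cannot match.
import Mathlib
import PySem

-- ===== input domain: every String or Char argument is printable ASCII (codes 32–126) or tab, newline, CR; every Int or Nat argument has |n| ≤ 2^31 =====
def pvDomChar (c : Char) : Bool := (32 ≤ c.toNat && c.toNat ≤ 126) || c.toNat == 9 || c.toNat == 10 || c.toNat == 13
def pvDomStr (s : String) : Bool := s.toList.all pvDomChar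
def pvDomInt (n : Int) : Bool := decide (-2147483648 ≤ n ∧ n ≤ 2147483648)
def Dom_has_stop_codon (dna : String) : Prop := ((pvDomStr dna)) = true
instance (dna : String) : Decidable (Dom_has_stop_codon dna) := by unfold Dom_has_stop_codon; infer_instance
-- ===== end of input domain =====

-- B: lowercase once, then consume whole codon triples against a stop-codon set (alternative decomposition; same return value).
-- ===== PORT A =====
def hasStopA_loop (l : List Char) (i : Nat) : Bool :=
  if i < l.length then
    -- codon = dna[i:i+3].lower()
    let codon := PySem.Chars.lower (PySem.List.slice l (some (i : Int)) (some ((i : Int) + 3)))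
    if codon ∈ ["tga".toList, "tag".toList, "taa".toList] then true
    else hasStopA_loop l (i + 3)
  else false
termination_by l.length - i

def has_stop_codon (dna : String) : Bool := hasStopA_loop dna.toList 0

-- ===== PORT B =====
def stopsB : PySem.Set (List Char) := PySem.Set.ofList ["tga".toList, "tag".toList, "taa".toList]

def hasStopB_go (s : List Char) : Bool :=
  match s with
  | a :: b :: c :: rest => PySem.Set.contains stopsB [a, b, c] || hasStopB_go rest
  | _ => false

def has_stop_codon_alt (dna : String) : Bool := hasStopB_go (PySem.Chars.lower dna.toList)

-- ===== PRECONDITION & SPEC =====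
def Spec_has_stop_codon (dna : String) (out : Bool) : Prop := out = has_stop_codon_alt dna
instance (dna : String) (out : Bool) : Decidable (Spec_has_stop_codon dna out) := by unfold Spec_has_stop_codon; infer_instance

-- ===== CLAIM (what is proved, stated in full; the proofs are below) =====
def Claim_equal_has_stop_codon : Prop := ∀ (dna : String), Dom_has_stop_codon dna → Spec_has_stop_codon dna (has_stop_codon dna)

-- ===== LEMMAS AND PROOFS =====

theorem stopsB_eq : stopsB = ["tga".toList, "tag".toList, "taa".toList] := by decide

theorem hasStopA_eq_go (l : List Char) (i : Nat) :
    hasStopA_loop l i = hasStopB_go ((PySem.Chars.lower l).drop i) := by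
  induction hn : l.length - i using Nat.strong_induction_on generalizing i with
  | _ n ih =>
  subst hn
  rw [hasStopA_loop]
  by_cases h : i < l.length
  · have hslice : PySem.List.slice l (some (i : Int)) (some ((i : Int) + 3)) =
        (l.drop i).take 3 := PySem.List.slice_natCast_add l i 3
    have hcodon : PySem.Chars.lower (PySem.List.slice l (some (i : Int)) (some ((i : Int) + 3))) =
        ((PySem.Chars.lower l).drop i).take 3 := by
      rw [hslice]
      show ((l.drop i).take 3).map PySem.Chars.lowerChar
          = ((l.map PySem.Chars.lowerChar).drop i).take 3
      rw [List.map_take, List.map_drop]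
    simp only [h, if_true, hcodon]
    have hrec := ih (l.length - (i + 3)) (by omega) (i + 3) rfl
    have hdrop3 : (PySem.Chars.lower l).drop (i + 3) = ((PySem.Chars.lower l).drop i).drop 3 := by
      rw [List.drop_drop]
    rcases hd : (PySem.Chars.lower l).drop i with _ | ⟨a, t0⟩
    · simp only [List.take_nil]
      rw [hrec, hdrop3, hd]
      simp [hasStopB_go]
    · rcases t0 with _ | ⟨b, t1⟩
      · rw [hrec, hdrop3, hd]
        simp [hasStopB_go]
      · rcases t1 with _ | ⟨c, rest⟩
        · rw [hrec, hdrop3, hd]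
          simp [hasStopB_go]
        · rw [hrec, hdrop3, hd]
          simp only [List.take_succ_cons, List.take_zero, List.drop_succ_cons, List.drop_zero]
          rw [hasStopB_go]
          rw [stopsB_eq]
          simp [PySem.Set.contains]
  · have hlen : (PySem.Chars.lower l).length = l.length := by
      show (l.map PySem.Chars.lowerChar).length = l.length
      simp
    have : (PySem.Chars.lower l).drop i = [] := by
      apply List.drop_eq_nil_of_le; omega
    rw [this]
    simp [h, hasStopB_go]

-- ===== VERDICT (by name: the statement is the Claim_ definition above) =====
theorem has_stop_codon_spec : Claim_equal_has_stop_codon := by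
  intro dna _
  unfold Spec_has_stop_codon has_stop_codon has_stop_codon_alt
  simpa using hasStopA_eq_go dna.toList 0
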